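-- pv_equiv track=rewrite | github.com/rinisme00/pointnet.pytorch-modified | convert/convert_ply_to_pts_seg.py | pick_label_field
-- ===== SOURCE A (Python) =====
-- PREFERRED_NAMES = ["Label", "label"]  # exact names first
--
-- def pick_label_field(vertex_prop_names):
--     """
--     Choose a label-like field:
--     1) exact 'Label' / 'label'
--     2) anything containing 'label' (case-insensitive)
--        break ties by: shorter name first, and prefer names not starting with 'scalar_'
--     """
--     names = list(vertex_prop_names)
--     for k in PREFERRED_NAMES:
--         if k in names:
--             return k
--     cands = [n for n in names if 'label' in n.lower()]
--     if not cands: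
--         return None
--     # Prefer the cleanest-looking name
--     cands.sort(key=lambda s: (len(s), s.startswith('scalar_')))
--     return cands[0]
-- ===== SOURCE B (Python) =====
-- def pick_label_field(vertex_prop_names):
--     # single pass: track exact-name hits and the best candidate simultaneously
--     has_cap = False
--     has_low = False
--     best = None  # (key, name), first-wins on equal keys
--     for n in vertex_prop_names:
--         if n == "Label":
--             has_cap = True
--         if n == "label":
--             has_low = True
--         if 'label' in n.lower():
--             key = (len(n), n.startswith('scalar_'))
--             if best is None or key < best[0]:
--                 best = (key, n)
--     if has_cap:
--         return "Label"
--     if has_low: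
--         return "label"
--     return None if best is None else best[1]
-- ===== Notes on version B (the rewrite author's own statement) =====
-- stated objective: alternative
-- what changed: Replaces A's staged passes (two exact-name membership scans, then a candidate filter, then a full sort and take-first) by a single loop over the names carrying an accumulator of two exact-match flags and the running best candidate (first-wins minimum of the (len, startswith('scalar_')) key), so no candidate list and no sort are ever built.
import Mathlib
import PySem

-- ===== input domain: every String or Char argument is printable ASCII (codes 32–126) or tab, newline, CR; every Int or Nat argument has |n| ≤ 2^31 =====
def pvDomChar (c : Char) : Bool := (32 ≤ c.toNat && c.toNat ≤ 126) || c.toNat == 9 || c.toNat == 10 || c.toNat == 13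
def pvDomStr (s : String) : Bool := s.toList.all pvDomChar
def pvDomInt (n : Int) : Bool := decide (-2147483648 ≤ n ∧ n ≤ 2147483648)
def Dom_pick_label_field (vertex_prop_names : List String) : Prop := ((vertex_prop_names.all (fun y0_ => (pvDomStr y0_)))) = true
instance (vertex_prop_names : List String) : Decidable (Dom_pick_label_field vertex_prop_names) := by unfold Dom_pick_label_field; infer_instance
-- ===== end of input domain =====

-- B replaces A's three staged passes (two membership scans, a filter, a sort) by ONE pass
-- carrying an accumulator (exact-name flags + running best candidate); simpler traversal, no sort.

-- ===== PORT A =====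
def PREFERRED_NAMES : List String := ["Label", "label"]

-- 'for k in PREFERRED_NAMES: if k in names: return k'
def pvFirstPreferred (ks : List String) (names : List String) : Option String :=
  match ks with
  | [] => none
  | k :: rest => if names.contains k then some k else pvFirstPreferred rest names

def pick_label_field (vertex_prop_names : List String) : Option String :=
  let names := vertex_prop_names
  match pvFirstPreferred PREFERRED_NAMES names with
  | some k => some k
  | none =>
    let cands := names.filter (fun n => PySem.Str.isIn "label" (PySem.Str.lower n))
    if cands.isEmpty then none
    else
      -- cands.sort(key=lambda s: (len(s), s.startswith('scalar_'))); return cands[0]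
      (PySem.List.sorted2 cands (fun s => PySem.Str.len s)
        (fun s => PySem.Str.startswith s "scalar_")).head?

-- ===== PORT B =====
-- Python tuple comparison 'key < best[0]' on (int, bool)
def pvKeyLt (a b : Int × Bool) : Bool := decide (a.1 < b.1) || (a.1 == b.1 && decide (a.2 < b.2))

-- one iteration of B's loop body over the state (has_cap, has_low, best)
def pvStep (st : Bool × Bool × Option ((Int × Bool) × String)) (n : String) :
    Bool × Bool × Option ((Int × Bool) × String) :=
  ( st.1 || (n == "Label"),
    st.2.1 || (n == "label"),
    if PySem.Str.isIn "label" (PySem.Str.lower n) then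
      let key := (PySem.Str.len n, PySem.Str.startswith n "scalar_")
      match st.2.2 with
      | none => some (key, n)
      | some b => if pvKeyLt key b.1 then some (key, n) else some b
    else st.2.2 )

def pick_label_field_alt (vertex_prop_names : List String) : Option String :=
  let st := vertex_prop_names.foldl pvStep (false, false, none)
  if st.1 then some "Label"
  else if st.2.1 then some "label"
  else match st.2.2 with
  | none => none
  | some b => some b.2

-- ===== PRECONDITION & SPEC =====
def Spec_pick_label_field (vertex_prop_names : List String) (out : Option String) : Prop := out = pick_label_field_alt vertex_prop_names
instance (vertex_prop_names : List String) (out : Option String) : Decidable (Spec_pick_label_field vertex_prop_names out) := by unfold Spec_pick_label_field; infer_instance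

-- ===== CLAIM (what is proved, stated in full; the proofs are below) =====
def Claim_equal_pick_label_field : Prop := ∀ (vertex_prop_names : List String), Dom_pick_label_field vertex_prop_names → Spec_pick_label_field vertex_prop_names (pick_label_field vertex_prop_names)

-- ===== LEMMAS AND PROOFS =====

def pvKey (n : String) : Int × Bool := (PySem.Str.len n, PySem.Str.startswith n "scalar_")

def pvPred (n : String) : Bool := PySem.Str.isIn "label" (PySem.Str.lower n)

-- sorted2's internal comparator on candidates
def pvLt (x m : String) : Bool :=
  decide (PySem.Str.len x < PySem.Str.len m) ||
    (!decide (PySem.Str.len m < PySem.Str.len x) &&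
      decide (PySem.Str.startswith x "scalar_" < PySem.Str.startswith m "scalar_"))

-- the option-min fold with sorted2's comparator
def pvOptMin (m : Option String) (x : String) : Option String :=
  match m with
  | none => some x
  | some m => if pvLt x m then some x else some m

-- the best-candidate fold of B, over an already-filtered list
def pvBStep (o : Option ((Int × Bool) × String)) (n : String) : Option ((Int × Bool) × String) :=
  match o with
  | none => some (pvKey n, n)
  | some b => if pvKeyLt (pvKey n) b.1 then some (pvKey n, n) else some b

theorem pvLt_aux (a b : Int) (p : Bool) :
    (decide (a < b) || ((a == b) && p)) = (decide (a < b) || (!decide (b < a) && p)) := by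
  by_cases h : a < b
  · simp [h]
  · by_cases h2 : b < a
    · simp [h2, show ¬ a = b by omega]
    · simp [show a = b by omega]

theorem pvKeyLt_eq_pvLt (x m : String) : pvKeyLt (pvKey x) (pvKey m) = pvLt x m := by
  simp only [pvKeyLt, pvKey, pvLt]
  exact pvLt_aux _ _ _

-- the head of an insertion step is the 'before'-minimum of the new element and the old head
theorem head?_insertBy {α : Type} (before : α → α → Bool) (x : α) (acc : List α) :
    (PySem.List.insertBy before x acc).head? =
      (match acc.head? with
       | none => some x
       | some m => if before x m then some x else some m) := by
  cases acc with
  | nil => simp [PySem.List.insertBy]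
  | cons y ys =>
    simp only [PySem.List.insertBy, List.head?_cons]
    split_ifs <;> simp

-- only the head of the accumulated sorted list matters: the insertion-sort fold's head
-- is the first-wins minimum fold
theorem head?_foldl_insertBy {α : Type} (before : α → α → Bool) (xs : List α) (acc : List α) :
    (xs.foldl (fun a x => PySem.List.insertBy before x a) acc).head? =
      xs.foldl (fun m x =>
        match m with
        | none => some x
        | some m => if before x m then some x else some m) acc.head? := by
  induction xs generalizing acc with
  | nil => rfl
  | cons x rest ih =>
    simp only [List.foldl_cons]
    rw [ih, head?_insertBy]

-- head of A's sort = first-wins option-min fold over the candidates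
theorem head?_sorted2_eq_optMin (xs : List String) :
    (PySem.List.sorted2 xs (fun s => PySem.Str.len s)
      (fun s => PySem.Str.startswith s "scalar_")).head? = xs.foldl pvOptMin none := by
  simp only [PySem.List.sorted2, if_neg (by decide : ¬ (false = true))]
  rw [head?_foldl_insertBy]
  rw [List.head?_nil]
  exact congrArg (fun f => List.foldl f none xs) (by funext m x; cases m <;> rfl)

-- the flag components of B's fold are membership tests
theorem foldl_pvStep_flags (names : List String) (st : Bool × Bool × Option ((Int × Bool) × String)) :
    (names.foldl pvStep st).1 = (st.1 || names.any (fun n => n == "Label")) ∧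
    (names.foldl pvStep st).2.1 = (st.2.1 || names.any (fun n => n == "label")) := by
  induction names generalizing st with
  | nil => simp
  | cons n rest ih =>
    simp only [List.foldl_cons, List.any_cons]
    obtain ⟨h1, h2⟩ := ih (pvStep st n)
    constructor
    · rw [h1]; simp [pvStep, Bool.or_assoc]
    · rw [h2]; simp [pvStep, Bool.or_assoc]

-- the best component of B's fold = the keyed fold over the filtered list
theorem foldl_pvStep_best (names : List String) (st : Bool × Bool × Option ((Int × Bool) × String)) :
    (names.foldl pvStep st).2.2 = (names.filter pvPred).foldl pvBStep st.2.2 := by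
  induction names generalizing st with
  | nil => rfl
  | cons n rest ih =>
    simp only [List.foldl_cons]
    rw [ih]
    by_cases h : pvPred n = true
    · rw [List.filter_cons_of_pos h, List.foldl_cons]
      congr 1
      simp only [pvStep, pvBStep, pvPred] at h ⊢
      rw [if_pos h]
      simp only [pvKey]
    · rw [List.filter_cons_of_neg (by simpa using h)]
      congr 1
      simp only [pvStep, pvPred] at h ⊢
      rw [if_neg (by simpa using h)]

-- the keyed fold is the option-min fold carrying the key alongside
theorem foldl_pvBStep_eq_map (xs : List String) (o : Option String) :
    xs.foldl pvBStep (o.map (fun n => (pvKey n, n))) =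
      (xs.foldl pvOptMin o).map (fun n => (pvKey n, n)) := by
  induction xs generalizing o with
  | nil => rfl
  | cons x rest ih =>
    simp only [List.foldl_cons]
    rw [← ih]
    congr 1
    cases o with
    | none => rfl
    | some m =>
      simp only [Option.map_some, pvBStep, pvOptMin, pvKeyLt_eq_pvLt]
      split_ifs <;> rfl

-- ===== VERDICT (by name: the statement is the Claim_ definition above) =====
theorem pick_label_field_spec : Claim_equal_pick_label_field := by
  intro names _
  show pick_label_field names = pick_label_field_alt names
  unfold pick_label_field pick_label_field_alt
  obtain ⟨h1, h2⟩ := foldl_pvStep_flags names (false, false, none)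
  simp only [h1, h2, Bool.false_or, foldl_pvStep_best names (false, false, none)]
  have hbest : (List.filter pvPred names).foldl pvBStep none =
      ((List.filter pvPred names).foldl pvOptMin none).map (fun n => (pvKey n, n)) := by
    have := foldl_pvBStep_eq_map (List.filter pvPred names) none
    simpa using this
  rw [hbest]
  have hmem : ∀ (l : List String) (a : String), l.contains a = l.any (fun n => n == a) := by
    intro l a
    induction l with
    | nil => simp
    | cons x xs ih => simp only [List.contains_cons, List.any_cons, ih, BEq.comm]
  have hcap := hmem names "Label"
  have hlow := hmem names "label"
  simp only [pvFirstPreferred, PREFERRED_NAMES, hcap, hlow]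
  by_cases hc : names.any (fun n => n == "Label") = true
  · simp [hc]
  · simp only [Bool.not_eq_true] at hc
    rw [hc, if_neg (by simp)]
    by_cases hl : names.any (fun n => n == "label") = true
    · simp [hl]
    · simp only [Bool.not_eq_true] at hl
      rw [hl, if_neg (by simp)]
      simp only [Bool.false_eq_true, if_false]
      rw [head?_sorted2_eq_optMin]
      show (if (List.filter pvPred names).isEmpty then none
            else (List.filter pvPred names).foldl pvOptMin none) = _
      by_cases he : (List.filter pvPred names).isEmpty
      · simp [List.isEmpty_iff.mp he]
      · simp only [he, if_false, Bool.false_eq_true]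
        cases hfold : (List.filter pvPred names).foldl pvOptMin none with
        | none =>
          exfalso
          have : List.filter pvPred names ≠ [] := by simpa [List.isEmpty_iff] using he
          cases hxs : List.filter pvPred names with
          | nil => exact this hxs
          | cons a as =>
            rw [hxs] at hfold
            have : ∀ (ys : List String) (m : String), ys.foldl pvOptMin (some m) ≠ none := by
              intro ys
              induction ys with
              | nil => intro m; simp
              | cons y ys ihy =>
                intro m
                simp only [List.foldl_cons, pvOptMin]
                split_ifs <;> apply ihy
            exact this as a (by simpa [pvOptMin] using hfold)
        | some m => simp
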